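-- pv_equiv track=rewrite | github.com/Lynsoo/POO-Python-Course | analysetexte.py | mots_extremes
-- ===== SOURCE A (Python) =====
-- def mots_extremes(frequences):
--     if not frequences:
--         return [], []
--     freq_max = max(frequences.values())
--     freq_min = min(frequences.values())
--     mots_max = [m for m, f in frequences.items() if f == freq_max]
--     mots_min = [m for m, f in frequences.items() if f == freq_min]
--     return mots_max, mots_min
-- ===== SOURCE B (Python) =====
-- def mots_extremes(frequences):
--     if not frequences:
--         return [], []
--     groupes = {}
--     for m, f in frequences.items():
--         groupes.setdefault(f, []).append(m)
--     return groupes[max(groupes)], groupes[min(groupes)]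
-- ===== Notes on version B (the rewrite author's own statement) =====
-- stated objective: alternative
-- what changed: Replaces A's four separate passes (max, min, two filtering comprehensions) with one pass building a frequency->words grouping dict, then two key lookups.
import Mathlib
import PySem

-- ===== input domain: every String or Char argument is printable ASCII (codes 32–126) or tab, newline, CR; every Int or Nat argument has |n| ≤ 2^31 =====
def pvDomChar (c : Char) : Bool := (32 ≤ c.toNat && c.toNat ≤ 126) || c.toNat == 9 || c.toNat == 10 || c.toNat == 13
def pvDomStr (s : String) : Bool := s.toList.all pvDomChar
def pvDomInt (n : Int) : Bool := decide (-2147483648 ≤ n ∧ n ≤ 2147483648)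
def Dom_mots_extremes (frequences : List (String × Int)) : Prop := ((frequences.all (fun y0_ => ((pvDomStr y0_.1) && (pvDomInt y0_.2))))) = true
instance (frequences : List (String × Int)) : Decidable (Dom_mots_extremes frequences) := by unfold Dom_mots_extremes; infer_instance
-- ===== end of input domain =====

-- B replaces A's four passes over the dict by one grouping pass plus two lookups; return-value-only equivalence (neither mutates its argument).

-- ===== PORT A =====
def mots_extremes (frequences : List (String × Int)) : List String × List String :=
  if frequences = [] then ([], [])
  else
    match PySem.List.max? (frequences.map Prod.snd) (fun v => v),
          PySem.List.min? (frequences.map Prod.snd) (fun v => v) with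
    | some freq_max, some freq_min =>
        ((frequences.filter (fun p => p.2 == freq_max)).map Prod.fst,
         (frequences.filter (fun p => p.2 == freq_min)).map Prod.fst)
    | _, _ => ([], [])  -- unreachable: the list is nonempty

-- ===== PORT B =====
def mots_extremes_alt (frequences : List (String × Int)) : List String × List String :=
  if frequences = [] then ([], [])
  else
    let groupes := frequences.foldl (fun d p => d.modify p.2 [] (fun l => l ++ [p.1])) PySem.Dict.empty
    match PySem.List.max? groupes.keys (fun v => v) with
    | none => ([], [])  -- unreachable: the dict is nonempty
    | some kmax =>
      match PySem.List.min? groupes.keys (fun v => v) with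
      | none => ([], [])  -- unreachable
      | some kmin => (groupes.getD kmax [], groupes.getD kmin [])

-- ===== PRECONDITION & SPEC =====
def Spec_mots_extremes (frequences : List (String × Int)) (out : List String × List String) : Prop := out = mots_extremes_alt frequences
instance (frequences : List (String × Int)) (out : List String × List String) : Decidable (Spec_mots_extremes frequences out) := by unfold Spec_mots_extremes; infer_instance

-- ===== CLAIM (what is proved, stated in full; the proofs are below) =====
def Claim_equal_mots_extremes : Prop := ∀ (frequences : List (String × Int)), Dom_mots_extremes frequences → Spec_mots_extremes frequences (mots_extremes frequences)

-- ===== LEMMAS AND PROOFS =====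

-- The grouping dict looks up to exactly A's filtering comprehension.
theorem groupes_getD (fs : List (String × Int)) (k : Int) :
    (fs.foldl (fun d p => d.modify p.2 [] (fun l => l ++ [p.1])) PySem.Dict.empty).getD k []
      = (fs.filter (fun p => p.2 == k)).map Prod.fst := by
  have h : fs.foldl (fun d p => d.modify p.2 [] (fun l => l ++ [p.1])) PySem.Dict.empty
      = (fs.map Prod.swap).foldl (fun d p => d.modify p.1 [] (fun l => l ++ [p.2])) PySem.Dict.empty := by
    rw [List.foldl_map]
    simp [Prod.swap]
  rw [h, PySem.Dict.getD_foldl_modify_append]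
  simp [List.filter_map, List.map_map, Function.comp_def, Prod.swap]

-- The grouping dict's keys are the distinct frequency values.
theorem groupes_keys_mem (fs : List (String × Int)) (k : Int) :
    k ∈ (fs.foldl (fun d p => d.modify p.2 [] (fun l => l ++ [p.1])) PySem.Dict.empty).keys
      ↔ k ∈ fs.map Prod.snd := by
  rw [PySem.Dict.keys_foldl_modify_key]
  simp [PySem.Set.mem_update, PySem.Dict.keys_empty]

-- Python's max/min of ints depends only on membership.
theorem max?_id_eq_of_mem_iff (xs ys : List Int) (h : ∀ x, x ∈ xs ↔ x ∈ ys)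
    (hx : xs ≠ []) :
    PySem.List.max? xs (fun v => v) = PySem.List.max? ys (fun v => v) := by
  obtain ⟨a, ha⟩ := Option.ne_none_iff_exists'.mp
    (fun hn => hx ((PySem.List.max?_eq_none_iff xs (fun v : Int => v)).mp hn))
  have hy : ys ≠ [] := by
    intro he; subst he
    exact absurd ((h a).mp (PySem.List.max?_mem ha)) (List.not_mem_nil)
  obtain ⟨b, hb⟩ := Option.ne_none_iff_exists'.mp
    (fun hn => hy ((PySem.List.max?_eq_none_iff ys (fun v : Int => v)).mp hn))
  have hab : a ≤ b := PySem.List.max?_isMax hb a ((h a).mp (PySem.List.max?_mem ha))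
  have hba : b ≤ a := PySem.List.max?_isMax ha b ((h b).mpr (PySem.List.max?_mem hb))
  rw [ha, hb, le_antisymm hab hba]

theorem min?_id_eq_of_mem_iff (xs ys : List Int) (h : ∀ x, x ∈ xs ↔ x ∈ ys)
    (hx : xs ≠ []) :
    PySem.List.min? xs (fun v => v) = PySem.List.min? ys (fun v => v) := by
  obtain ⟨a, ha⟩ := Option.ne_none_iff_exists'.mp
    (fun hn => hx ((PySem.List.min?_eq_none_iff xs (fun v : Int => v)).mp hn))
  have hy : ys ≠ [] := by
    intro he; subst he
    exact absurd ((h a).mp (PySem.List.min?_mem ha)) (List.not_mem_nil)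
  obtain ⟨b, hb⟩ := Option.ne_none_iff_exists'.mp
    (fun hn => hy ((PySem.List.min?_eq_none_iff ys (fun v : Int => v)).mp hn))
  have hab : a ≤ b := PySem.List.min?_isMin ha b ((h b).mpr (PySem.List.min?_mem hb))
  have hba : b ≤ a := PySem.List.min?_isMin hb a ((h a).mp (PySem.List.min?_mem ha))
  rw [ha, hb, le_antisymm hab hba]

-- ===== VERDICT (by name: the statement is the Claim_ definition above) =====
theorem mots_extremes_spec : Claim_equal_mots_extremes := by
  intro fs _
  unfold Spec_mots_extremes mots_extremes mots_extremes_alt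
  by_cases hfs : fs = []
  · simp [hfs]
  · simp only [if_neg hfs]
    set g := fs.foldl (fun d p => d.modify p.2 [] (fun l => l ++ [p.1])) PySem.Dict.empty with hg
    have hkeys : ∀ x, x ∈ g.keys ↔ x ∈ fs.map Prod.snd := fun x => groupes_keys_mem fs x
    have hkne : g.keys ≠ [] := by
      intro he
      obtain ⟨p, hp⟩ := List.exists_mem_of_ne_nil fs hfs
      have : p.2 ∈ g.keys := (hkeys p.2).mpr (List.mem_map_of_mem hp)
      simp [he] at this
    have hmax : PySem.List.max? (fs.map Prod.snd) (fun v => v) = PySem.List.max? g.keys (fun v => v) :=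
      max?_id_eq_of_mem_iff _ _ (fun x => (hkeys x).symm) (by simp [hfs])
    have hmin : PySem.List.min? (fs.map Prod.snd) (fun v => v) = PySem.List.min? g.keys (fun v => v) :=
      min?_id_eq_of_mem_iff _ _ (fun x => (hkeys x).symm) (by simp [hfs])
    rw [hmax, hmin]
    obtain ⟨a, ha⟩ := Option.ne_none_iff_exists'.mp
      (fun hn => hkne ((PySem.List.max?_eq_none_iff g.keys (fun v : Int => v)).mp hn))
    obtain ⟨b, hb⟩ := Option.ne_none_iff_exists'.mp
      (fun hn => hkne ((PySem.List.min?_eq_none_iff g.keys (fun v : Int => v)).mp hn))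
    rw [ha, hb]
    simp only [hg, groupes_getD]
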